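-- pv_equiv track=rewrite | github.com/kovalchukalexandr/k-r-2-Kovalchuk | five_oop.py | sum_between_last_zeros
-- ===== SOURCE A (Python) =====
-- def sum_between_last_zeros(numbers):
--     last_zero_index = -1
--     second_last_zero_index = -1
--
--     # Ищем индексы последних двух нулей
--     for i in range(len(numbers)):
--         if numbers[i] == 0:
--             second_last_zero_index = last_zero_index
--             last_zero_index = i
--
--     # Проверяем, есть ли последние два нуля и не идут ли они подряд
--     if second_last_zero_index == -1 or last_zero_index == second_last_zero_index + 1:
--         return 0
--
--     # Считаем сумму между двумя последними нулями
--     return sum(numbers[second_last_zero_index + 1:last_zero_index])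
-- ===== SOURCE B (Python) =====
-- def sum_between_last_zeros(numbers):
--     zeros = 0    # how many zeros seen so far
--     seg = 0      # running sum of elements since the most recent zero
--     between = 0  # sum of the segment between the last two zeros seen so far
--     for x in numbers:
--         if x == 0:
--             if zeros:
--                 between = seg
--             zeros += 1
--             seg = 0
--         else:
--             seg += x
--     return between if zeros >= 2 else 0
-- ===== Notes on version B (the rewrite author's own statement) =====
-- stated objective: alternative
-- what changed: B does a single index-free pass maintaining running sums (segment-since-last-zero and last completed between-zeros segment) instead of A's pass that records the last two zero indices and then sums a slice; B never indexes or slices the list and needs no adjacency check.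
import Mathlib
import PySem

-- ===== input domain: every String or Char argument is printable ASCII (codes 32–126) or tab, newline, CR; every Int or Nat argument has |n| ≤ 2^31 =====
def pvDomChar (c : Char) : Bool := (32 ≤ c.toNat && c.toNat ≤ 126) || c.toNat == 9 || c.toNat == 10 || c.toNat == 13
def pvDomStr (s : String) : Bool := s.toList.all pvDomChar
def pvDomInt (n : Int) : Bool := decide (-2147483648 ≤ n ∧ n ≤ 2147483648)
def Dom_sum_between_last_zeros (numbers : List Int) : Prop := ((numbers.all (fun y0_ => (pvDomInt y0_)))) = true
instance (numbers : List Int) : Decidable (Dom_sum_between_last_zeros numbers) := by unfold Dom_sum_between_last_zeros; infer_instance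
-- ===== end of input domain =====

-- B replaces A's index bookkeeping (record the last two zero indices, then sum a slice)
-- by one index-free pass maintaining running sums: the sum since the most recent zero and
-- the last completed between-zeros sum (objective: alternative; same O(n) cost).

-- ===== PORT A =====
def pvStepA (numbers : List Int) (st : Int × Int) (i : Int) : Int × Int :=
  if PySem.List.pyGetD numbers i 0 = 0 then (st.2, i) else st

def sum_between_last_zeros (numbers : List Int) : Int :=
  let st := (PySem.List.pyRange 0 (numbers.length : Int) 1).foldl (pvStepA numbers) (-1, -1)
  if st.1 = -1 ∨ st.2 = st.1 + 1 then 0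
  else (PySem.List.slice numbers (some (st.1 + 1)) (some st.2)).sum

-- ===== PORT B =====
-- state: (zeros seen, sum since most recent zero, sum between last two zeros seen)
def pvStepB (st : Int × Int × Int) (x : Int) : Int × Int × Int :=
  if x = 0 then (st.1 + 1, 0, if st.1 ≠ 0 then st.2.1 else st.2.2)
  else (st.1, st.2.1 + x, st.2.2)

def sum_between_last_zeros_alt (numbers : List Int) : Int :=
  let st := numbers.foldl pvStepB (0, 0, 0)
  if 2 ≤ st.1 then st.2.2 else 0

-- ===== PRECONDITION & SPEC =====
def Spec_sum_between_last_zeros (numbers : List Int) (out : Int) : Prop := out = sum_between_last_zeros_alt numbers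
instance (numbers : List Int) (out : Int) : Decidable (Spec_sum_between_last_zeros numbers out) := by unfold Spec_sum_between_last_zeros; infer_instance

-- ===== CLAIM (what is proved, stated in full; the proofs are below) =====
def Claim_equal_sum_between_last_zeros : Prop := ∀ (numbers : List Int), Dom_sum_between_last_zeros numbers → Spec_sum_between_last_zeros numbers (sum_between_last_zeros numbers)

-- ===== LEMMAS AND PROOFS =====

-- A's index loop, rewritten as a fold over enumerate (the same computation step for step)
def pvG (st : Int × Int) (p : Int × Int) : Int × Int :=
  if p.2 = 0 then (st.2, p.1) else st

lemma pv_foldA_enum (xs : List Int) (init : Int × Int) :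
    (PySem.List.pyRange 0 (xs.length : Int) 1).foldl (pvStepA xs) init
      = (PySem.List.enumerate xs 0).foldl pvG init := by
  rw [PySem.List.enumerate_eq_map_pyRange xs 0, List.foldl_map]
  simp only [PySem.List.len_eq]
  rfl

-- joint loop invariant of the two passes, by induction appending on the right:
-- B's zero counter is the number of zeros; when ≥ 1 zero, A's last index points at the last
-- zero and B's `seg` is the sum after it; when ≥ 2 zeros, B's `between` is the sum of the
-- elements strictly between A's two recorded indices.
lemma pv_inv (xs : List Int) :
    (xs.foldl pvStepB (0, 0, 0)).1 = (xs.count 0 : Int) ∧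
    (xs.count 0 ≤ 1 → ((PySem.List.enumerate xs 0).foldl pvG (-1, -1)).1 = -1) ∧
    (xs.count 0 = 0 → ((PySem.List.enumerate xs 0).foldl pvG (-1, -1)).2 = -1) ∧
    (1 ≤ xs.count 0 → ∃ k : Nat,
        ((PySem.List.enumerate xs 0).foldl pvG (-1, -1)).2 = (k : Int) ∧ k < xs.length ∧
        (xs.foldl pvStepB (0, 0, 0)).2.1 = (xs.drop (k + 1)).sum) ∧
    (2 ≤ xs.count 0 → ∃ j k : Nat,
        ((PySem.List.enumerate xs 0).foldl pvG (-1, -1)).1 = (j : Int) ∧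
        ((PySem.List.enumerate xs 0).foldl pvG (-1, -1)).2 = (k : Int) ∧ j < k ∧ k < xs.length ∧
        (xs.foldl pvStepB (0, 0, 0)).2.2 = ((xs.drop (j + 1)).take (k - (j + 1))).sum) := by
  induction xs using List.reverseRecOn with
  | nil => simp
  | append_singleton xs x ih =>
    obtain ⟨hz, h1, h0, hk, hjk⟩ := ih
    have henum : PySem.List.enumerate (xs ++ [x]) 0
        = PySem.List.enumerate xs 0 ++ [((xs.length : Int), x)] := by
      rw [PySem.List.enumerate_append]
      simp [PySem.List.enumerate_cons, PySem.List.enumerate_nil]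
    rw [henum]
    simp only [List.foldl_append, List.foldl_cons, List.foldl_nil, List.count_append,
      List.length_append, List.length_singleton]
    set sA := (PySem.List.enumerate xs 0).foldl pvG (-1, -1) with hsA
    set sB := xs.foldl pvStepB (0, 0, 0) with hsB
    set c := xs.count 0 with hc
    by_cases hx : x = 0
    · subst hx
      have hcnt : ([(0 : Int)] : List Int).count 0 = 1 := by simp
      rw [hcnt]
      simp only [pvG, pvStepB]
      refine ⟨by rw [hz]; push_cast; omega, ?_, by omega, ?_, ?_⟩
      · intro h
        exact h0 (by omega)
      · intro _
        exact ⟨xs.length, rfl, by omega, by simp [List.drop_eq_nil_of_le]⟩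
      · intro h
        obtain ⟨k, hk2, hklen, hseg⟩ := hk (by omega)
        refine ⟨k, xs.length, hk2, rfl, hklen, by omega, ?_⟩
        have hzne : sB.1 ≠ 0 := by rw [hz]; exact_mod_cast by omega
        rw [List.drop_append_of_le_length (by omega),
          List.take_append_of_le_length (by simp)]
        have hlen : xs.length - (k + 1) = (xs.drop (k + 1)).length := by simp
        rw [hlen, List.take_length]
        simp [hzne, hseg]
    · have hcnt : ([x] : List Int).count 0 = 0 := by simp [hx]
      rw [hcnt]
      simp only [pvG, pvStepB, if_neg hx]
      refine ⟨by rw [hz]; push_cast; omega, by simpa using h1, by simpa using h0, ?_, ?_⟩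
      · intro h
        obtain ⟨k, hk2, hklen, hseg⟩ := hk (by omega)
        refine ⟨k, hk2, by omega, ?_⟩
        rw [hseg, List.drop_append_of_le_length (by omega)]
        simp
      · intro h
        obtain ⟨j, k, hj2, hk2, hjlt, hklen, hbet⟩ := hjk (by omega)
        refine ⟨j, k, hj2, hk2, hjlt, by omega, ?_⟩
        rw [hbet, List.drop_append_of_le_length (by omega),
          List.take_append_of_le_length (by simp; omega)]

-- ===== VERDICT (by name: the statement is the Claim_ definition above) =====
theorem sum_between_last_zeros_spec : Claim_equal_sum_between_last_zeros := by
  intro numbers _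
  unfold Spec_sum_between_last_zeros sum_between_last_zeros sum_between_last_zeros_alt
  rw [pv_foldA_enum]
  obtain ⟨hz, h1, h0, hk, hjk⟩ := pv_inv numbers
  set sA := (PySem.List.enumerate numbers 0).foldl pvG (-1, -1) with hsA
  set sB := numbers.foldl pvStepB (0, 0, 0) with hsB
  by_cases hc : 2 ≤ numbers.count 0
  · obtain ⟨j, k, hj2, hk2, hjlt, hklen, hbet⟩ := hjk hc
    have hB : (2 : Int) ≤ sB.1 := by rw [hz]; exact_mod_cast hc
    rw [if_pos hB]
    have hA1 : ¬ sA.1 = -1 := by rw [hj2]; omega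
    by_cases hadj : sA.2 = sA.1 + 1
    · have hkj : k = j + 1 := by
        rw [hj2, hk2] at hadj; exact_mod_cast hadj
      rw [if_pos (Or.inr hadj), hbet, hkj]
      simp
    · rw [if_neg (by tauto), hbet, hj2, hk2,
        PySem.List.slice_toNat numbers (by omega) (by omega)]
      have e1 : ((j : Int) + 1).toNat = j + 1 := by omega
      have e2 : ((k : Int)).toNat = k := by omega
      rw [e1, e2]
  · have hB : ¬ (2 : Int) ≤ sB.1 := by
      rw [hz]; intro h; exact hc (by exact_mod_cast h)
    rw [if_neg hB, if_pos (Or.inl (h1 (by omega)))]
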